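-- pv_equiv track=rewrite | github.com/feizheng10/GPTune | examples/rocFFT/rocFFT_kernel_tuning.py | supported_threads_per_transform
-- ===== SOURCE A (Python) =====
-- from itertools import chain, combinations
-- from functools import reduce
-- from operator import mul
--
-- def power_set(iterable):
--     s = list(iterable)
--     return list(chain.from_iterable(combinations(s, r) for r in range(len(s) + 1)))
--
-- def supported_threads_per_transform(factorization):
--     tpts = set()
--     tpt_candidates = power_set(factorization)
--     for tpt in tpt_candidates:
--         if not tpt:
--             continue
--         product = reduce(mul, tpt, 1)
--         tpts.add(product)
--     return tpts
-- ===== SOURCE B (Python) =====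
-- def supported_threads_per_transform(factorization):
--     # Layered DP: layer r holds (product, remaining-suffix) pairs for all size-r
--     # combinations, pruned of duplicate pairs; one multiplication per new pair.
--     tpts = set()
--     layer = [(1, tuple(factorization))]
--     for _ in range(len(factorization)):
--         nxt = []
--         seen = set()
--         for p, rest in layer:
--             for i, f in enumerate(rest):
--                 e = (p * f, rest[i + 1:])
--                 if e not in seen:
--                     seen.add(e)
--                     nxt.append(e)
--         for q, _ in nxt:
--             tpts.add(q)
--         layer = nxt
--     return tpts
-- ===== Notes on version B (the rewrite author's own statement) =====
-- stated objective: faster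
-- what changed: B replaces the materialized power set (itertools.combinations per size, reduce-multiplying each subset from scratch) by a layered DP over (partial product, remaining suffix) pairs, extending each pair by one factor per layer and pruning duplicate pairs with a seen-set, so duplicate-heavy factor lists never enumerate their exponentially many equal subsets.
import Mathlib
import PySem

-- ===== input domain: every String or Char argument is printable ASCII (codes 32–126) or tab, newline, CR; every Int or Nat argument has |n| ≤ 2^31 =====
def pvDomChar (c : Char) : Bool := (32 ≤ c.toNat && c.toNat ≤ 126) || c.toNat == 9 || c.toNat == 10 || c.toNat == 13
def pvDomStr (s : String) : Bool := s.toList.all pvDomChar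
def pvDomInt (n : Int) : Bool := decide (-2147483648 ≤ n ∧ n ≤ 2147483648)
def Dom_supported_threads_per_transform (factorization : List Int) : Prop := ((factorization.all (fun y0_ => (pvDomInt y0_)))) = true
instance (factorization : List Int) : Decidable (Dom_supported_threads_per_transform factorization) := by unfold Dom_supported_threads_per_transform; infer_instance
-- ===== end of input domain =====

-- B replaces the power-set enumeration (itertools + reduce) by a layered DP over
-- (partial product, remaining suffix) pairs with per-layer duplicate pruning:
-- one multiplication per new pair, and duplicate-heavy factor lists collapse
-- from exponentially many subsets to few distinct pairs (objective: faster).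

-- ===== PORT A =====
-- itertools.combinations(s, r) in its lexicographic emission order (exact)
def pyCombinations : List Int → Nat → List (List Int)
  | _, 0 => [[]]
  | [], _ + 1 => []
  | x :: xs, r + 1 => (pyCombinations xs r).map (fun c => x :: c) ++ pyCombinations xs (r + 1)

def power_set (iterable : List Int) : List (List Int) :=
  (List.range (iterable.length + 1)).flatMap (fun r => pyCombinations iterable r)

def supported_threads_per_transform (factorization : List Int) : List Int :=
  (power_set factorization).foldl
    (fun tpts tpt => if tpt = [] then tpts else PySem.Set.add tpts (tpt.foldl (· * ·) 1))
    PySem.Set.empty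

-- ===== PORT B =====
-- the inner 'for i, f in enumerate(rest): (p * rest[i], rest[i+1:])' loop (exact)
def sttExpand (p : Int) : List Int → List (Int × List Int)
  | [] => []
  | f :: rest => (p * f, rest) :: sttExpand p rest

-- one iteration of B's for-loop body: build nxt pruned of duplicate pairs
-- (the seen-set first-occurrence filter is PySem.List.dedup), add its products
def sttStep (st : PySem.Set Int × List (Int × List Int)) : PySem.Set Int × List (Int × List Int) :=
  let nxt := PySem.List.dedup (st.2.flatMap (fun pr => sttExpand pr.1 pr.2))
  (PySem.Set.update st.1 (nxt.map Prod.fst), nxt)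

def supported_threads_per_transform_alt (factorization : List Int) : List Int :=
  ((List.range factorization.length).foldl (fun st _ => sttStep st)
    (PySem.Set.empty, [(1, factorization)])).1

-- ===== PRECONDITION & SPEC =====
def Spec_supported_threads_per_transform (factorization : List Int) (out : List Int) : Prop := out = supported_threads_per_transform_alt factorization
instance (factorization : List Int) (out : List Int) : Decidable (Spec_supported_threads_per_transform factorization out) := by unfold Spec_supported_threads_per_transform; infer_instance

-- ===== CLAIM (what is proved, stated in full; the proofs are below) =====
def Claim_equal_supported_threads_per_transform : Prop := ∀ (factorization : List Int), Dom_supported_threads_per_transform factorization → Spec_supported_threads_per_transform factorization (supported_threads_per_transform factorization)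

-- ===== LEMMAS AND PROOFS =====

-- combinations carrying the partial product and the remaining suffix
def combR : List Int → Nat → Int → List (Int × List Int)
  | l, 0, p => [(p, l)]
  | [], _ + 1, _ => []
  | x :: xs, r + 1, p => combR xs r (p * x) ++ combR xs (r + 1) p

def nextL (lay : List (Int × List Int)) : List (Int × List Int) :=
  lay.flatMap (fun pr => sttExpand pr.1 pr.2)

theorem nextL_append (a b : List (Int × List Int)) : nextL (a ++ b) = nextL a ++ nextL b := by
  simp [nextL]

theorem nextL_combR (l : List Int) : ∀ (r : Nat) (p : Int),
    nextL (combR l r p) = combR l (r + 1) p := by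
  induction l with
  | nil =>
    intro r p
    cases r with
    | zero => simp [combR, nextL, sttExpand]
    | succ r => simp [combR, nextL]
  | cons x xs ih =>
    intro r p
    cases r with
    | zero =>
      have h := ih 0 p
      simp [combR, nextL, sttExpand] at h ⊢
      exact h
    | succ r =>
      show nextL (combR xs r (p * x) ++ combR xs (r + 1) p) = _
      rw [nextL_append, ih r (p * x), ih (r + 1) p]
      rfl

theorem map_fst_combR (l : List Int) : ∀ (r : Nat) (p : Int),
    (combR l r p).map Prod.fst = (pyCombinations l r).map (fun c => c.foldl (· * ·) p) := by
  induction l with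
  | nil =>
    intro r p
    cases r with
    | zero => simp [combR, pyCombinations]
    | succ r => simp [combR, pyCombinations]
  | cons x xs ih =>
    intro r p
    cases r with
    | zero => simp [combR, pyCombinations]
    | succ r =>
      show (combR xs r (p * x) ++ combR xs (r + 1) p).map Prod.fst = _
      rw [List.map_append, ih r (p * x), ih (r + 1) p]
      simp [pyCombinations, List.map_append, List.map_map, Function.comp]

theorem combR_ne_nil (l : List Int) : ∀ (r : Nat), ∀ c ∈ pyCombinations l (r + 1), c ≠ [] := by
  induction l with
  | nil => intro r c hc; simp [pyCombinations] at hc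
  | cons x xs ih =>
    intro r c hc
    simp only [pyCombinations, List.mem_append, List.mem_map] at hc
    rcases hc with ⟨c', _, rfl⟩ | hc
    · simp
    · exact ih r c hc

-- ---- first-occurrence filtering (Python's seen-set pattern), relative to a seen list

def dedupExcl {α : Type} [BEq α] (s : List α) : List α → List α
  | [] => []
  | x :: u => if s.contains x then dedupExcl s u else x :: dedupExcl (s ++ [x]) u

theorem update_eq_dedupExcl {α : Type} [BEq α] (u : List α) : ∀ (s : List α),
    PySem.Set.update s u = s ++ dedupExcl s u := by
  induction u with
  | nil => intro s; simp [PySem.Set.update, dedupExcl]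
  | cons x u ih =>
    intro s
    show PySem.Set.update (PySem.Set.add s x) u = _
    by_cases h : s.contains x
    · have ha : PySem.Set.add s x = s := by
        simp [PySem.Set.add, PySem.Set.contains, h]
      have hd : dedupExcl s (x :: u) = dedupExcl s u := by
        simp [dedupExcl, h]
      rw [ha, hd, ih s]
    · have ha : PySem.Set.add s x = s ++ [x] := by
        simp [PySem.Set.add, PySem.Set.contains, h]
      have hd : dedupExcl s (x :: u) = x :: dedupExcl (s ++ [x]) u := by
        simp [dedupExcl, h]
      rw [ha, hd, ih (s ++ [x])]
      simp

theorem dedup_eq_dedupExcl {α : Type} [BEq α] (u : List α) :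
    PySem.List.dedup u = dedupExcl [] u := by
  have h := update_eq_dedupExcl u []
  simpa [PySem.List.dedup, PySem.Set.ofList_eq_foldl, PySem.Set.update] using h

theorem dedupExcl_append_of_seen {α : Type} [BEq α] (u : List α) : ∀ (s w : List α),
    (∀ y ∈ u, s.contains y = true) → dedupExcl s (u ++ w) = dedupExcl s w := by
  induction u with
  | nil => intro s w _; rfl
  | cons x u ih =>
    intro s w h
    have hx := h x (by simp)
    simp only [List.cons_append, dedupExcl, hx, if_true]
    exact ih s w (fun y hy => h y (by simp [hy]))

theorem dedupExcl_append {α : Type} [BEq α] (u : List α) : ∀ (s w : List α),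
    dedupExcl s (u ++ w) = dedupExcl s u ++ dedupExcl (s ++ dedupExcl s u) w := by
  induction u with
  | nil => intro s w; simp [dedupExcl]
  | cons x u ih =>
    intro s w
    by_cases h : s.contains x
    · simp only [List.cons_append, dedupExcl, h, if_true]
      exact ih s w
    · simp only [List.cons_append, dedupExcl, h, Bool.false_eq_true, ite_false]
      rw [ih (s ++ [x]) w]
      simp

theorem mem_seen_dedupExcl {α : Type} [BEq α] [LawfulBEq α] (u : List α) : ∀ (s : List α) (y : α),
    y ∈ u → y ∈ s ++ dedupExcl s u := by
  induction u with
  | nil => intro s y hy; cases hy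
  | cons x u ih =>
    intro s y hy
    by_cases h : s.contains x
    · simp only [dedupExcl, h, if_true]
      rcases List.mem_cons.mp hy with rfl | hy'
      · exact List.mem_append.mpr (Or.inl (List.contains_iff_mem.mp h))
      · exact ih s y hy'
    · simp only [dedupExcl, h, Bool.false_eq_true, ite_false]
      rcases List.mem_cons.mp hy with rfl | hy'
      · simp
      · have := ih (s ++ [x]) y hy'
        simp only [List.mem_append, List.mem_cons] at this ⊢
        tauto

-- duplicate pairs of a layer may be pruned: the downstream first-occurrence
-- stream of an expansion is unchanged
theorem dedupExcl_flatMap_prune {α β : Type} [BEq α] [LawfulBEq α] [BEq β] [LawfulBEq β] (f : β → List α)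
    (l : List β) : ∀ (t : List β) (s : List α),
    (∀ x ∈ t, ∀ y ∈ f x, s.contains y = true) →
    dedupExcl s (l.flatMap f) = dedupExcl s ((dedupExcl t l).flatMap f) := by
  induction l with
  | nil => intro t s _; rfl
  | cons x l ih =>
    intro t s h
    by_cases hx : t.contains x
    · simp only [List.flatMap_cons, dedupExcl, hx, if_true]
      rw [dedupExcl_append_of_seen (f x) s _ (h x (List.contains_iff_mem.mp hx))]
      exact ih t s h
    · simp only [List.flatMap_cons, dedupExcl, hx, Bool.false_eq_true, ite_false]
      rw [dedupExcl_append, dedupExcl_append]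
      congr 1
      apply ih (t ++ [x])
      intro x' hx' y hy
      rcases List.mem_append.mp hx' with hx'' | hx''
      · have := h x' hx'' y hy
        simp only [List.contains_eq_mem, decide_eq_true_eq] at this ⊢
        simp [this]
      · have hxx : x' = x := by simpa using hx''
        subst hxx
        have := mem_seen_dedupExcl (f x') s y hy
        simpa [List.contains_eq_mem] using this

theorem dedup_flatMap_dedup {α β : Type} [BEq α] [LawfulBEq α] [BEq β] [LawfulBEq β] (f : β → List α)
    (l : List β) :
    PySem.List.dedup (l.flatMap f) = PySem.List.dedup ((PySem.List.dedup l).flatMap f) := by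
  rw [dedup_eq_dedupExcl, dedup_eq_dedupExcl, dedup_eq_dedupExcl]
  exact dedupExcl_flatMap_prune f l [] [] (by intro x hx; cases hx)

theorem dedup_map_congr {α β : Type} [BEq α] [LawfulBEq α] [BEq β] [LawfulBEq β] (f : β → α)
    {u v : List β} (h : PySem.List.dedup u = PySem.List.dedup v) :
    PySem.List.dedup (u.map f) = PySem.List.dedup (v.map f) := by
  have huv : ∀ (w : List β), w.map f = w.flatMap (fun x => [f x]) := by
    intro w
    induction w with
    | nil => rfl
    | cons a w ihw => simp [ihw]
  have hu := huv u
  have hv := huv v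
  rw [hu, hv, dedup_flatMap_dedup, h, ← dedup_flatMap_dedup]

theorem dedupExcl_filter {α : Type} [BEq α] [LawfulBEq α] (u : List α) : ∀ (s : List α),
    dedupExcl s u = (dedupExcl [] u).filter (fun x => !s.contains x) := by
  induction u with
  | nil => intro s; rfl
  | cons x u ih =>
    intro s
    have h0 : dedupExcl ([] : List α) (x :: u) = x :: dedupExcl [x] u := by
      simp [dedupExcl]
    rw [h0, List.filter_cons]
    by_cases h : s.contains x = true
    · have hb : (!s.contains x) = false := by rw [h]; rfl
      rw [hb]
      simp only [Bool.false_eq_true, if_false]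
      have hd : dedupExcl s (x :: u) = dedupExcl s u := by
        show (if s.contains x = true then dedupExcl s u else x :: dedupExcl (s ++ [x]) u) = _
        rw [if_pos h]
      rw [hd, ih s, ih [x], List.filter_filter]
      refine List.filter_congr ?_
      intro y _
      by_cases hyx : y = x
      · subst hyx
        rw [h]
        simp
      · have hc : (([x] : List α).contains y) = false := by
          simp [List.contains_eq_mem, hyx]
        rw [hc]
        simp
    · have h' : s.contains x = false := by simpa using h
      have hb : (!s.contains x) = true := by rw [h']; rfl
      rw [hb, if_pos rfl]
      have hd : dedupExcl s (x :: u) = x :: dedupExcl (s ++ [x]) u := by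
        show (if s.contains x = true then dedupExcl s u else x :: dedupExcl (s ++ [x]) u) = _
        rw [if_neg h]
      rw [hd]
      congr 1
      rw [ih (s ++ [x]), ih [x], List.filter_filter]
      refine List.filter_congr ?_
      intro y _
      by_cases hyx : y = x
      · subst hyx
        simp [List.contains_eq_mem]
      · simp [List.contains_eq_mem, hyx]

theorem update_congr_dedup {α : Type} [BEq α] [LawfulBEq α] (s : List α) {u v : List α}
    (h : PySem.List.dedup u = PySem.List.dedup v) :
    PySem.Set.update s u = PySem.Set.update s v := by
  rw [update_eq_dedupExcl, update_eq_dedupExcl,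
      dedupExcl_filter u s, dedupExcl_filter v s,
      ← dedup_eq_dedupExcl, ← dedup_eq_dedupExcl, h]

theorem dedupExcl_of_nodup {α : Type} [BEq α] [LawfulBEq α] (v : List α) : ∀ (s : List α),
    (∀ y ∈ v, s.contains y = false) → v.Nodup → dedupExcl s v = v := by
  induction v with
  | nil => intro s _ _; rfl
  | cons x v ih =>
    intro s h hn
    have hx : s.contains x = false := h x (by simp)
    simp only [dedupExcl, hx, Bool.false_eq_true, ite_false]
    congr 1
    apply ih
    · intro y hy
      have h1 : s.contains y = false := h y (by simp [hy])
      have h2 : y ≠ x := by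
        intro e; subst e; exact (List.nodup_cons.mp hn).1 hy
      simp [List.contains_eq_mem, h2] at h1 ⊢
      tauto
    · exact (List.nodup_cons.mp hn).2

theorem dedup_dedup {α : Type} [BEq α] [LawfulBEq α] (u : List α) :
    PySem.List.dedup (PySem.List.dedup u) = PySem.List.dedup u := by
  have hn : (PySem.List.dedup u).Nodup := PySem.Set.nodup_ofList u
  rw [dedup_eq_dedupExcl (PySem.List.dedup u)]
  exact dedupExcl_of_nodup _ [] (by intro y _; rfl) hn

-- ---- B's loop, characterised layer by layer

def prunedLayer (l : List Int) : Nat → List (Int × List Int)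
  | 0 => [(1, l)]
  | k + 1 => PySem.List.dedup (nextL (prunedLayer l k))

def tgt (l : List Int) (n : Nat) : PySem.Set Int :=
  PySem.Set.ofList ((List.range n).flatMap
    (fun k => (pyCombinations l (k + 1)).map (fun c => c.foldl (· * ·) 1)))

theorem dedup_prunedLayer (l : List Int) : ∀ (k : Nat),
    PySem.List.dedup (prunedLayer l k) = PySem.List.dedup (combR l k 1) := by
  intro k
  induction k with
  | zero => cases l <;> rfl
  | succ k ih =>
    show PySem.List.dedup (PySem.List.dedup (nextL (prunedLayer l k))) = _
    rw [dedup_dedup, ← nextL_combR l k 1]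
    show PySem.List.dedup (List.flatMap _ (prunedLayer l k)) = _
    rw [dedup_flatMap_dedup, ih, ← dedup_flatMap_dedup]
    rfl

theorem B_loop (l : List Int) : ∀ (n : Nat),
    (List.range n).foldl (fun st _ => sttStep st) (PySem.Set.empty, [(1, l)])
      = (tgt l n, prunedLayer l n) := by
  intro n
  induction n with
  | zero => rfl
  | succ n ih =>
    rw [List.range_succ, List.foldl_append, ih]
    show sttStep (tgt l n, prunedLayer l n) = _
    have hlay : PySem.List.dedup ((prunedLayer l n).flatMap (fun pr => sttExpand pr.1 pr.2))
        = prunedLayer l (n + 1) := rfl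
    simp only [sttStep, hlay]
    congr 1
    · -- products added this round
      have hd : PySem.List.dedup ((prunedLayer l (n + 1)).map Prod.fst)
          = PySem.List.dedup ((combR l (n + 1) 1).map Prod.fst) :=
        dedup_map_congr Prod.fst (dedup_prunedLayer l (n + 1))
      rw [update_congr_dedup (tgt l n) hd, map_fst_combR]
      show _ = tgt l (n + 1)
      simp only [tgt, List.range_succ, List.flatMap_append]
      rw [PySem.Set.ofList_eq_foldl, PySem.Set.ofList_eq_foldl, List.foldl_append]
      simp [PySem.Set.update]

-- ---- A's fold, characterised

theorem A_fold_nonempty (ps : List (List Int)) : ∀ (t : PySem.Set Int),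
    (∀ c ∈ ps, c ≠ []) →
    ps.foldl (fun tpts tpt => if tpt = [] then tpts else PySem.Set.add tpts (tpt.foldl (· * ·) 1)) t
      = PySem.Set.update t (ps.map (fun c => c.foldl (· * ·) 1)) := by
  induction ps with
  | nil => intro t _; rfl
  | cons c ps ih =>
    intro t h
    have hc : c ≠ [] := h c (by simp)
    simp only [List.foldl_cons, if_neg hc]
    rw [ih _ (fun c' hc' => h c' (by simp [hc']))]
    rfl

theorem A_eq_tgt (l : List Int) :
    supported_threads_per_transform l = tgt l l.length := by
  unfold supported_threads_per_transform power_set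
  rw [List.range_succ_eq_map]
  simp only [List.flatMap_cons, List.flatMap_map]
  have h0 : pyCombinations l 0 = [[]] := by cases l <;> rfl
  rw [h0]
  have hne : ∀ c ∈ (List.range l.length).flatMap (fun a => pyCombinations l a.succ), c ≠ [] := by
    intro c hc
    rcases List.mem_flatMap.mp hc with ⟨r, _, hc'⟩
    exact combR_ne_nil l r c hc'
  simp only [List.singleton_append, List.foldl_cons, reduceIte]
  rw [A_fold_nonempty _ _ hne]
  simp only [tgt, List.map_flatMap]
  rw [PySem.Set.ofList_eq_foldl]
  rfl

-- ===== VERDICT (by name: the statement is the Claim_ definition above) =====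
theorem supported_threads_per_transform_spec : Claim_equal_supported_threads_per_transform := by
  intro l _
  show supported_threads_per_transform l = supported_threads_per_transform_alt l
  rw [A_eq_tgt]
  unfold supported_threads_per_transform_alt
  rw [B_loop l l.length]
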